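-- pv_equiv track=rewrite | github.com/shengrihui/Leetcode | 周赛/周赛/第 376 场周赛/2-100161. 划分数组并满足最大差限制.py | divideArray
-- ===== SOURCE A (Python) =====
-- from typing import List
--
-- def divideArray(nums: List[int], k: int) -> List[List[int]]:
--     nums.sort()
--     ans = []
--     for i in range(0, len(nums), 3):
--         if nums[i + 2] - nums[i] > k:
--             return []
--         ans.append(nums[i: i + 3])
--     return ans
-- ===== SOURCE B (Python) =====
-- def divideArray(nums, k):
--     nums.sort()
--     groups = []
--     first = 0
--     for pos, x in enumerate(nums):
--         r = pos % 3
--         if r == 0: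
--             first = x
--             groups.append([x])
--         elif r == 1:
--             groups[-1].append(x)
--         else:
--             if x - first > k:
--                 return []
--             groups[-1].append(x)
--     return groups
-- ===== Notes on version B (the rewrite author's own statement) =====
-- stated objective: alternative
-- what changed: A loops over start indices in steps of 3, slicing out nums[i:i+3] and checking nums[i+2]-nums[i] by random access; B makes one element-wise enumerate pass with no slicing or random access, dispatching on pos % 3 to open a new group, append to the last group, or compare the element against the remembered group-start value.
import Mathlib
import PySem

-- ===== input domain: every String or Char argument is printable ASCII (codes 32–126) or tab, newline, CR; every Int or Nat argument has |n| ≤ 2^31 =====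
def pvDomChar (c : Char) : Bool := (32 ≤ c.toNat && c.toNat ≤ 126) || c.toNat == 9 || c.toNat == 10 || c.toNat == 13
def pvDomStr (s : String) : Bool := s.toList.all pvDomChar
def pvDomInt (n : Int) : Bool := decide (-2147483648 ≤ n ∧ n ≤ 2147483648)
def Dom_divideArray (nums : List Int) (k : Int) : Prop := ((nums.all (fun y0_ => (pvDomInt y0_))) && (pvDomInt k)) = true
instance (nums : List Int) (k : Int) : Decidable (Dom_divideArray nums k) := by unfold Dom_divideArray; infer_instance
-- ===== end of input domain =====

-- B (divideArray_alt) replaces A's stride-3 index loop with slicing by one element-wise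
-- enumerate pass: dispatch on pos % 3 to open a group, append to the last group, or compare
-- against the remembered group-start value. Objective: alternative decomposition, same cost.
-- Both A and B sort `nums` in place; the equivalence proved here is about the return value.

-- ===== PORT A =====
-- A's loop `for i in range(0, len(nums), 3)` with early return; `nums[i+2]` raising
-- IndexError (pyGet? = none) is excluded by Pre_divideArray, the port returns [] there.
def pvAgo (s : List Int) (k : Int) (i : Nat) (ans : List (List Int)) : List (List Int) :=
  if i < s.length then
    match PySem.List.pyGet? s ((i : Int) + 2), PySem.List.pyGet? s (i : Int) with
    | some x2, some x0 =>
      if x2 - x0 > k then []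
      else pvAgo s k (i + 3) (ans ++ [PySem.List.slice s (some (i : Int)) (some ((i : Int) + 3))])
    | _, _ => []  -- IndexError: outside Pre_divideArray
  else ans
termination_by s.length - i
decreasing_by omega

def divideArray (nums : List Int) (k : Int) : List (List Int) :=
  pvAgo (PySem.List.sorted nums id) k 0 []

-- ===== PORT B =====
-- `groups[-1].append(x)`: mutate the last group in place.  Python raises IndexError on an
-- empty `groups`, which the loop never reaches (pos 0 opens a group first); default [] here.
def pvAppendLast (gs : List (List Int)) (x : Int) : List (List Int) :=
  gs.dropLast ++ [(gs.getLast?.getD []) ++ [x]]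

-- the enumerate loop of B; `pos % 3` with pos ≥ 0, where Int.emod agrees with Python's %
def pvBgo (k : Int) (pairs : List (Int × Int)) (groups : List (List Int)) (first : Int) :
    List (List Int) :=
  match pairs with
  | [] => groups
  | (pos, x) :: rest =>
    if pos % 3 = 0 then pvBgo k rest (groups ++ [[x]]) x
    else if pos % 3 = 1 then pvBgo k rest (pvAppendLast groups x) first
    else if x - first > k then []
    else pvBgo k rest (pvAppendLast groups x) first

def divideArray_alt (nums : List Int) (k : Int) : List (List Int) :=
  pvBgo k (PySem.List.enumerate (PySem.List.sorted nums id) 0) [] 0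

-- ===== PRECONDITION & SPEC =====
-- Pre_ excludes exactly the inputs on which A raises IndexError (length not a multiple of 3
-- and no earlier full sorted triple wider than k); B returns a value with a short tail group there.
def Pre_divideArray (nums : List Int) (k : Int) : Prop :=
  nums.length % 3 = 0 ∨
    ∃ j < nums.length, 3 * j + 2 < nums.length ∧
      (PySem.List.sorted nums id).getD (3 * j + 2) 0
        - (PySem.List.sorted nums id).getD (3 * j) 0 > k
instance (nums : List Int) (k : Int) : Decidable (Pre_divideArray nums k) := by
  unfold Pre_divideArray; infer_instance

def pvWitness_divideArray : List Int × Int := ([1, 3, 2], 5)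

def Spec_divideArray (nums : List Int) (k : Int) (out : List (List Int)) : Prop := out = divideArray_alt nums k
instance (nums : List Int) (k : Int) (out : List (List Int)) : Decidable (Spec_divideArray nums k out) := by unfold Spec_divideArray; infer_instance

-- ===== CLAIM (what is proved, stated in full; the proofs are below) =====
def Claim_equal_divideArray : Prop := ∀ (nums : List Int) (k : Int), Dom_divideArray nums k → Pre_divideArray nums k → Spec_divideArray nums k (divideArray nums k)

-- ===== LEMMAS AND PROOFS =====

-- the chunk appended by A's port, for i+2 < length
theorem chunk_getD (s : List Int) (i : Nat) (h : i + 2 < s.length) :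
    (PySem.List.slice s (some (i : Int)) (some ((i : Int) + 3))) =
      [s[i], s[i + 1], s[i + 2]] := by
  have h3 : ((i : Int) + 3) = ((i + 3 : Nat) : Int) := by push_cast; ring
  rw [h3, PySem.List.slice_natCast]
  have : i + 3 - i = 3 := by omega
  rw [this]
  apply List.ext_getElem
  · simp; omega
  · intro n h1 h2
    have hn : n < 3 := by simpa using h2
    simp only [List.getElem_take, List.getElem_drop]
    interval_cases n <;> simp

-- three steps of B's loop consume one aligned full group
theorem pvBgo_triple (k : Int) (i a b c : Int) (rest : List (Int × Int))
    (groups : List (List Int)) (first : Int) (hi : i % 3 = 0) :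
    pvBgo k ((i, a) :: (i + 1, b) :: (i + 2, c) :: rest) groups first =
      if c - a > k then [] else pvBgo k rest (groups ++ [[a, b, c]]) a := by
  have h1 : (i + 1) % 3 = 1 := by omega
  have h2 : (i + 2) % 3 = 2 := by omega
  rw [pvBgo, if_pos hi, pvBgo, if_neg (by omega), if_pos h1,
      pvBgo, if_neg (by omega), if_neg (by omega)]
  have e1 : pvAppendLast (groups ++ [[a]]) b = groups ++ [[a, b]] := by
    simp [pvAppendLast]
  have e2 : pvAppendLast (groups ++ [[a, b]]) c = groups ++ [[a, b, c]] := by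
    simp [pvAppendLast]
  rw [e1]
  split_ifs with h
  · rfl
  · rw [e2]

-- A's loop from index i equals B's loop on the enumerated tail, given the Pre_ condition
theorem pvAgo_eq (s : List Int) (k : Int) :
    ∀ fuel i ans first, s.length ≤ i + fuel → i % 3 = 0 →
      (s.length % 3 = 0 ∨
        ∃ j, i ≤ 3 * j ∧ 3 * j + 2 < s.length ∧
          s.getD (3 * j + 2) 0 - s.getD (3 * j) 0 > k) →
      pvAgo s k i ans = pvBgo k (PySem.List.enumerate (s.drop i) (i : Int)) ans first := by
  intro fuel
  induction fuel with
  | zero =>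
    intro i ans first hfuel _ _
    rw [pvAgo, if_neg (by omega), List.drop_eq_nil_of_le (by omega),
        PySem.List.enumerate_nil, pvBgo]
  | succ f ih => ?_
  intro i ans first hfuel h3 hcond
  by_cases hlt : i < s.length
  · have hfull : i + 2 < s.length := by
      rcases hcond with hm | ⟨j, hij, hj2, _⟩ <;> omega
    have hx2 : PySem.List.pyGet? s ((i : Int) + 2) = some s[i + 2] := by
      have : ((i : Int) + 2) = ((i + 2 : Nat) : Int) := by push_cast; ring
      rw [this, PySem.List.pyGet?_natCast]
      simp [List.getElem?_eq_getElem hfull]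
    have hx0 : PySem.List.pyGet? s ((i : Int)) = some s[i] := by
      rw [PySem.List.pyGet?_natCast]
      simp [List.getElem?_eq_getElem hlt]
    have hdrop : s.drop i = s[i] :: s[i + 1] :: s[i + 2] :: s.drop (i + 3) := by
      rw [List.drop_eq_getElem_cons hlt,
          List.drop_eq_getElem_cons (by omega : i + 1 < s.length),
          List.drop_eq_getElem_cons (by omega : i + 2 < s.length)]
    rw [pvAgo]
    simp only [if_pos hlt, hx2, hx0]
    rw [hdrop, PySem.List.enumerate_cons, PySem.List.enumerate_cons,
        PySem.List.enumerate_cons]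
    have hn2 : (i : Int) + 1 + 1 = (i : Int) + 2 := by ring
    have hn3 : (i : Int) + 2 + 1 = (i : Int) + 3 := by ring
    rw [hn2, hn3]
    have hi3 : (i : Int) % 3 = 0 := by omega
    rw [pvBgo_triple k (i : Int) s[i] s[i + 1] s[i + 2] _ ans first hi3]
    by_cases hfail : s[i + 2] - s[i] > k
    · rw [if_pos hfail, if_pos hfail]
    · rw [if_neg hfail, if_neg hfail]
      have hcond' : (s.length % 3 = 0 ∨
          ∃ j, i + 3 ≤ 3 * j ∧ 3 * j + 2 < s.length ∧
            s.getD (3 * j + 2) 0 - s.getD (3 * j) 0 > k) := by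
        rcases hcond with hm | ⟨j, hij, hj2, hjf⟩
        · exact Or.inl hm
        · right
          refine ⟨j, ?_, hj2, hjf⟩
          rcases Nat.lt_or_ge i (3 * j) with hlt' | hge
          · omega
          · exfalso
            apply hfail
            have hji : 3 * j = i := by omega
            rw [hji, List.getD_eq_getElem _ _ hfull,
                List.getD_eq_getElem _ _ (by omega : i < s.length)] at hjf
            exact hjf
      have := ih (i + 3) (ans ++ [PySem.List.slice s (some (i : Int)) (some ((i : Int) + 3))])
        (s[i]) (by omega) (by omega) hcond'
      rw [this, chunk_getD s i hfull]
      have hc3 : ((i + 3 : Nat) : Int) = (i : Int) + 3 := by push_cast; ring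
      rw [hc3]
  · rw [pvAgo, if_neg hlt, List.drop_eq_nil_of_le (by omega),
        PySem.List.enumerate_nil, pvBgo]

-- ===== VERDICT (by name: the statement is the Claim_ definition above) =====
theorem divideArray_spec : Claim_equal_divideArray := by
  intro nums k _ hpre
  unfold Spec_divideArray divideArray divideArray_alt
  set s := PySem.List.sorted nums id with hs
  have hlen : s.length = nums.length := PySem.List.length_sorted nums id false
  have hcond : (s.length % 3 = 0 ∨
      ∃ j, 0 ≤ 3 * j ∧ 3 * j + 2 < s.length ∧
        s.getD (3 * j + 2) 0 - s.getD (3 * j) 0 > k) := by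
    rcases hpre with hm | ⟨j, _, hj2, hjf⟩
    · left; omega
    · right; exact ⟨j, by omega, by omega, by rw [hs]; exact hjf⟩
  have := pvAgo_eq s k s.length 0 [] 0 (by omega) (by omega) hcond
  rw [this]
  norm_num
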